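-- pv_equiv track=rewrite | github.com/malaggang2/project_euler | problem_15.py | search_road
-- ===== SOURCE A (Python) =====
-- def search_road(a, b):
--     i = 1
--     num = [1] * b
--     while i < a + 1:
--         num[0] = num[0] + 1
--         for j in range(1, b):
--             num[j] = num[j] + num[j-1]
--         i += 1
--     return num[-1]
-- ===== SOURCE B (Python) =====
-- def search_road(a, b):
--     # C(a+b, b) by the multiplicative formula over the smaller side
--     lo, hi = (a, b) if a < b else (b, a)
--     res = 1
--     for k in range(1, lo + 1):
--         res = res * (hi + k) // k
--     return res
-- ===== Notes on version B (the rewrite author's own statement) =====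
-- stated objective: faster
-- what changed: A fills a b-cell Pascal row a times (O(a*b) additions); B computes C(a+b,b) directly with the multiplicative binomial formula over min(a,b) exact-division steps.
import Mathlib
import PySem

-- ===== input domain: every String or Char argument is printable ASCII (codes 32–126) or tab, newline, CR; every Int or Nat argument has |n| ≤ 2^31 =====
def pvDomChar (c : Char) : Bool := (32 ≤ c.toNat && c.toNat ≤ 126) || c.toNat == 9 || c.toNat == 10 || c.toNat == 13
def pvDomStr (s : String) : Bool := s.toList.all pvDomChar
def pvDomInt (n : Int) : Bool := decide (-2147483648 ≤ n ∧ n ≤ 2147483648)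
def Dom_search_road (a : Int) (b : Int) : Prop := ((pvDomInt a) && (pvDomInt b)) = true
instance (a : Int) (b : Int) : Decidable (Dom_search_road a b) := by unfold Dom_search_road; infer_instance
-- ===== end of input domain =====

-- B replaces A's a×b Pascal-row table sweep by the multiplicative binomial formula
-- C(a+b,b) over min(a,b) factors (objective: faster, asymptotic O(a*b) → O(min(a,b))).

-- ===== PORT A =====
-- The Python list num is ported as an Array so the in-place writes stay O(1);
-- every index below (j, j-1 with j in range(1,b), and 0) is nonnegative and in
-- range exactly when Python does not raise, so .toNat / setIfInBounds are exact
-- there (b ≤ 0, where Python raises IndexError, is excluded by Pre_).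
-- inner-loop body: num[j] = num[j] + num[j-1]
def pvStepA (nm : Array Int) (j : Int) : Array Int :=
  nm.setIfInBounds j.toNat (nm.getD j.toNat 0 + nm.getD (j - 1).toNat 0)

-- one iteration of the while body: num[0] = num[0] + 1; for j in range(1, b): …
def pvPassA (b : Int) (num : Array Int) : Array Int :=
  (PySem.List.pyRange 1 b 1).foldl pvStepA
    (num.setIfInBounds 0 (num.getD 0 0 + 1))

-- while i < a + 1: …; i += 1
def pvLoopA (a b : Int) (i : Int) (num : Array Int) : Array Int :=
  if _h : i < a + 1 then pvLoopA a b (i + 1) (pvPassA b num) else num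
termination_by (a + 1 - i).toNat
decreasing_by omega

-- num[-1]: back? is Python's num[-1] (none = IndexError, excluded by Pre_)
def search_road (a : Int) (b : Int) : Int :=
  ((pvLoopA a b 1 (Array.replicate b.toNat (1 : Int))).back?).getD 0

-- ===== PORT B =====
def search_road_alt (a : Int) (b : Int) : Int :=
  let lo := if a < b then a else b
  let hi := if a < b then b else a
  (PySem.List.pyRange 1 (lo + 1) 1).foldl
    (fun res k => PySem.Int.floordiv (res * (hi + k)) k) 1

-- ===== PRECONDITION & SPEC =====
-- Pre_ excludes exactly b ≤ 0, where A raises IndexError on num[-1] (num = [1]*b is empty).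
def Pre_search_road (a : Int) (b : Int) : Prop := 1 ≤ b
instance (a : Int) (b : Int) : Decidable (Pre_search_road a b) := by
  unfold Pre_search_road; infer_instance
def pvWitness_search_road : Int × Int := (4, 3)

def Spec_search_road (a : Int) (b : Int) (out : Int) : Prop := out = search_road_alt a b
instance (a : Int) (b : Int) (out : Int) : Decidable (Spec_search_road a b out) := by
  unfold Spec_search_road; infer_instance

-- ===== CLAIM (what is proved, stated in full; the proofs are below) =====
def Claim_equal_search_road : Prop := ∀ (a : Int) (b : Int), Dom_search_road a b → Pre_search_road a b → Spec_search_road a b (search_road a b)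
-- ===== LEMMAS AND PROOFS =====

-- proof-side List mirror of the Array port (PySem primitives, easier to reason about)
def pvStepL (nm : List Int) (j : Int) : List Int :=
  PySem.List.pySetD nm j (PySem.List.pyGetD nm j 0 + PySem.List.pyGetD nm (j - 1) 0)

def pvPassL (b : Int) (num : List Int) : List Int :=
  (PySem.List.pyRange 1 b 1).foldl pvStepL
    (PySem.List.pySetD num 0 (PySem.List.pyGetD num 0 0 + 1))

lemma pvGetD_bridge (nm : Array Int) (i : Nat) (d : Int) : nm.getD i d = nm.toList.getD i d := by
  simp [Array.getD_eq_getD_getElem?, List.getD_eq_getElem?_getD, ← Array.getElem?_toList]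

lemma pvStep_bridge (nm : Array Int) (j : Int) (hj : 1 ≤ j) :
    (pvStepA nm j).toList = pvStepL nm.toList j := by
  unfold pvStepA pvStepL
  rw [PySem.List.pySetD_of_nonneg _ _ (by omega), PySem.List.pyGetD_of_nonneg _ _ (by omega),
    PySem.List.pyGetD_of_nonneg _ _ (by omega), Array.toList_setIfInBounds,
    pvGetD_bridge, pvGetD_bridge]

lemma pvFold_bridge (l : List Int) (hl : ∀ x ∈ l, 1 ≤ x) (nm : Array Int) :
    (l.foldl pvStepA nm).toList = l.foldl pvStepL nm.toList := by
  induction l generalizing nm with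
  | nil => rfl
  | cons x xs ih =>
    rw [List.foldl_cons, List.foldl_cons, ← pvStep_bridge nm x (hl x List.mem_cons_self),
      ih (fun y hy => hl y (List.mem_cons_of_mem x hy))]

lemma pvPass_bridge (b : Int) (num : Array Int) :
    (pvPassA b num).toList = pvPassL b num.toList := by
  unfold pvPassA pvPassL
  rw [pvFold_bridge _ (fun x hx => (PySem.List.mem_pyRange_one.1 hx).1) _,
    Array.toList_setIfInBounds, PySem.List.pySetD_of_nonneg _ _ (by omega),
    PySem.List.pyGetD_of_nonneg _ _ (by omega), pvGetD_bridge]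
  norm_num

lemma pvIter_bridge (b : Int) (n : Nat) (num : Array Int) :
    ((pvPassA b)^[n] num).toList = (pvPassL b)^[n] num.toList := by
  induction n with
  | zero => rfl
  | succ n ih => rw [Function.iterate_succ_apply', Function.iterate_succ_apply',
      pvPass_bridge, ih]

lemma pvBack_bridge (nm : Array Int) : nm.back? = nm.toList.getLast? := by
  simp [Array.back?_eq_getElem?, List.getLast?_eq_getElem?, ← Array.getElem?_toList]

-- prefix sum of the first j+1 entries of nm
def pvSum (nm : List Int) (j : Nat) : Int :=
  ((List.range (j + 1)).map (fun t => PySem.List.pyGetD nm (t : Int) 0)).sum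

lemma pvSum_succ (nm : List Int) (j : Nat) :
    pvSum nm (j + 1) = pvSum nm j + PySem.List.pyGetD nm ((j + 1 : Nat) : Int) 0 := by
  simp [pvSum, List.range_succ]; ring

-- the inner for-loop computes prefix sums of its input list
lemma pvInner (nm : List Int) (m : Nat) (hm : m ≤ nm.length) :
    ((PySem.List.pyRange 1 (m : Int) 1).foldl pvStepL nm).length = nm.length ∧
    ∀ j : Nat, j < nm.length →
      PySem.List.pyGetD ((PySem.List.pyRange 1 (m : Int) 1).foldl pvStepL nm) (j : Int) 0 =
        if j < m then pvSum nm j else PySem.List.pyGetD nm (j : Int) 0 := by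
  induction m with
  | zero =>
    rw [show ((0 : Nat) : Int) = 0 by norm_num, PySem.List.pyRange_one_eq_nil (by omega)]
    simp
  | succ m ih =>
    by_cases hm0 : m = 0
    · subst hm0
      rw [show ((1 : Nat) : Int) = 1 by norm_num, PySem.List.pyRange_one_eq_nil (by omega)]
      refine ⟨rfl, fun j hj => ?_⟩
      by_cases hj0 : j = 0
      · subst hj0
        simp [pvSum]
      · rw [if_neg (by omega)]; simp
    · obtain ⟨hlen, hval⟩ := ih (by omega)
      rw [show ((m + 1 : Nat) : Int) = (m : Int) + 1 by push_cast; ring,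
        PySem.List.pyRange_one_succ_right (by exact_mod_cast Nat.one_le_iff_ne_zero.2 hm0),
        List.foldl_append]
      set r := (PySem.List.pyRange 1 (m : Int) 1).foldl pvStepL nm with hr
      have hstep : List.foldl pvStepL r [(m : Int)] = PySem.List.pySetD r (m : Int)
          (PySem.List.pyGetD r (m : Int) 0 + PySem.List.pyGetD r ((m : Int) - 1) 0) := by
        simp [pvStepL]
      have hgm : PySem.List.pyGetD r (m : Int) 0 = PySem.List.pyGetD nm (m : Int) 0 := by
        rw [hval m (by omega), if_neg (by omega)]
      have hgm1 : PySem.List.pyGetD r ((m : Int) - 1) 0 = pvSum nm (m - 1) := by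
        rw [show (m : Int) - 1 = ((m - 1 : Nat) : Int) by omega, hval (m - 1) (by omega),
          if_pos (by omega)]
      have hv : PySem.List.pyGetD r (m : Int) 0 + PySem.List.pyGetD r ((m : Int) - 1) 0 =
          pvSum nm m := by
        rw [hgm, hgm1]
        have := pvSum_succ nm (m - 1)
        rw [show m - 1 + 1 = m by omega] at this
        rw [this]; ring
      rw [hstep, hv]
      constructor
      · rw [PySem.List.length_pySetD, hlen]
      · intro j hj
        rw [show PySem.List.pySetD r (m : Int) (pvSum nm m) =
            PySem.List.pySetD r ((m : Nat) : Int) (pvSum nm m) by norm_num,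
          PySem.List.pyGetD_pySetD_natCast r m j _ 0 (by omega)]
        by_cases hjm : j = m
        · subst hjm; simp
        · rw [if_neg hjm, hval j hj]
          by_cases hlt : j < m
          · rw [if_pos hlt, if_pos (by omega)]
          · rw [if_neg hlt, if_neg (by omega)]

-- pvPassL maps entry j to 1 + (prefix sum of old entries up to j)
lemma pvPass_val (nm : List Int) (L : Nat) (hlen : nm.length = L) (hL : 1 ≤ L)
    (j : Nat) (hj : j < L) :
    PySem.List.pyGetD (pvPassL (L : Int) nm) (j : Int) 0 =
      pvSum (PySem.List.pySetD nm 0 (PySem.List.pyGetD nm 0 0 + 1)) j := by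
  set nm' := PySem.List.pySetD nm 0 (PySem.List.pyGetD nm 0 0 + 1) with hnm'
  have hlen' : nm'.length = L := by rw [hnm', PySem.List.length_pySetD, hlen]
  obtain ⟨_, hval⟩ := pvInner nm' L (by omega)
  unfold pvPassL
  rw [← hnm', hval j (by omega), if_pos hj]

lemma pvPass_len (nm : List Int) (L : Nat) (hlen : nm.length = L) :
    (pvPassL (L : Int) nm).length = L := by
  set nm' := PySem.List.pySetD nm 0 (PySem.List.pyGetD nm 0 0 + 1) with hnm'
  have hlen' : nm'.length = L := by rw [hnm', PySem.List.length_pySetD, hlen]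
  obtain ⟨h, _⟩ := pvInner nm' L (by omega)
  unfold pvPassL
  rw [← hnm', h, hlen']

lemma pvLoop_eq : ∀ (n : Nat) (a b i : Int) (num : Array Int), (a + 1 - i).toNat = n →
    pvLoopA a b i num = (pvPassA b)^[n] num := by
  intro n
  induction n with
  | zero =>
    intro a b i num h
    rw [pvLoopA, dif_neg (by omega)]
    rfl
  | succ n ih =>
    intro a b i num h
    rw [pvLoopA, dif_pos (by omega), ih a b (i + 1) _ (by omega),
      Function.iterate_succ_apply]

lemma pvIter_len (L n : Nat) :
    ((pvPassL (L : Int))^[n] (List.replicate L (1 : Int))).length = L := by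
  induction n with
  | zero => simp
  | succ n ih => rw [Function.iterate_succ_apply', pvPass_len _ L ih]

-- after n passes entry j holds C(n+j+1, j+1)
lemma pvIter_model (L : Nat) (hL : 1 ≤ L) (n : Nat) :
    ∀ j : Nat, j < L →
      PySem.List.pyGetD ((pvPassL (L : Int))^[n] (List.replicate L (1 : Int))) (j : Int) 0 =
        ((n + j + 1).choose (j + 1) : Int) := by
  induction n with
  | zero =>
    intro j hj
    simp only [Function.iterate_zero_apply, PySem.List.pyGetD_natCast]
    rw [List.getD_eq_getElem?_getD, List.getElem?_replicate, if_pos hj]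
    simp [Nat.choose_self]
  | succ n ih =>
    set st := (pvPassL (L : Int))^[n] (List.replicate L (1 : Int)) with hst
    have hstlen : st.length = L := pvIter_len L n
    set st' := PySem.List.pySetD st 0 (PySem.List.pyGetD st 0 0 + 1) with hst'
    have hent : ∀ t : Nat, t < L → PySem.List.pyGetD st' (t : Int) 0 =
        if t = 0 then PySem.List.pyGetD st 0 0 + 1 else PySem.List.pyGetD st (t : Int) 0 := by
      intro t ht
      simpa using PySem.List.pyGetD_pySetD_natCast st 0 t
        (PySem.List.pyGetD st 0 0 + 1) 0 (by omega)
    have hzero : PySem.List.pyGetD st 0 0 = ((n + 1).choose 1 : Int) := by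
      have := ih 0 (by omega)
      rw [show ((0 : Nat) : Int) = (0 : Int) by norm_num] at this
      simpa using this
    have key : ∀ j : Nat, j < L → pvSum st' j = (((n + j + 2).choose (j + 1) : Nat) : Int) := by
      intro j
      induction j with
      | zero =>
        intro _
        have h0 : pvSum st' 0 = PySem.List.pyGetD st' ((0 : Nat) : Int) 0 := by
          simp [pvSum]
        rw [h0, hent 0 (by omega), if_pos rfl, hzero, Nat.choose_one_right,
          Nat.choose_one_right]
        push_cast; ring
      | succ j ihj =>
        intro hj
        rw [pvSum_succ, ihj (by omega), hent (j + 1) hj, if_neg (by omega),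
          ih (j + 1) hj]
        norm_cast
    intro j hj
    rw [Function.iterate_succ_apply', ← hst, pvPass_val st L hstlen hL j hj, ← hst',
      key j hj, show n + 1 + j + 1 = n + j + 2 by ring]

-- B's fold computes the binomial coefficient
lemma pvAlt_fold (h m : Nat) :
    (PySem.List.pyRange 1 ((m : Int) + 1) 1).foldl
        (fun res k => PySem.Int.floordiv (res * ((h : Int) + k)) k) 1 =
      ((h + m).choose m : Int) := by
  induction m with
  | zero =>
    rw [show ((0 : Nat) : Int) + 1 = 1 by norm_num, PySem.List.pyRange_one_eq_nil (by omega)]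
    simp
  | succ m ih =>
    rw [show ((m + 1 : Nat) : Int) + 1 = ((m : Int) + 1) + 1 by push_cast; ring,
      PySem.List.pyRange_one_succ_right (by omega), List.foldl_append, ih]
    simp only [List.foldl_cons, List.foldl_nil]
    rw [show (h : Int) + ((m : Int) + 1) = ((h + m + 1 : Nat) : Int) by push_cast; ring,
      show ((m : Int) + 1) = ((m + 1 : Nat) : Int) by push_cast; ring,
      ← Nat.cast_mul, PySem.Int.floordiv_natCast]
    norm_cast
    rw [show (h + m).choose m * (h + m + 1) = (h + m + 1).choose (m + 1) * (m + 1) by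
        rw [mul_comm]; exact Nat.add_one_mul_choose_eq (h + m) m,
      Nat.mul_div_cancel _ (by omega), show h + (m + 1) = h + m + 1 by ring]

-- A's table sweep returns C(a.toNat + L, L) on a list of positive length L
lemma pvA_val (a : Int) (L : Nat) (hL : 1 ≤ L) :
    search_road a (L : Int) = (((a.toNat + L).choose L : Nat) : Int) := by
  unfold search_road
  rw [pvLoop_eq a.toNat a (L : Int) 1 _ (by omega), pvBack_bridge, pvIter_bridge]
  simp only [Array.toList_replicate, Int.toNat_natCast]
  set st := (pvPassL (L : Int))^[a.toNat] (List.replicate L (1 : Int)) with hst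
  have hstlen : st.length = L := pvIter_len L a.toNat
  rw [List.getLast?_eq_getElem?, hstlen]
  have hm := pvIter_model L hL a.toNat (L - 1) (by omega)
  rw [PySem.List.pyGetD_natCast, List.getD_eq_getElem?_getD] at hm
  rw [hm, show a.toNat + (L - 1) + 1 = a.toNat + L by omega, show L - 1 + 1 = L by omega]

-- ===== VERDICT (by name: the statement is the Claim_ definition above) =====
theorem search_road_spec : Claim_equal_search_road := by
  unfold Claim_equal_search_road
  intro a b _ hPre
  unfold Pre_search_road at hPre
  unfold Spec_search_road
  set L := b.toNat with hLdef
  have hL : 1 ≤ L := by omega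
  have hb : b = (L : Int) := by omega
  rw [hb, pvA_val a L hL]
  simp only [search_road_alt]
  by_cases hab : a < (L : Int)
  · simp only [if_pos hab]
    by_cases ha : a ≤ 0
    · rw [PySem.List.pyRange_one_eq_nil (by omega)]
      have h0 : a.toNat = 0 := by omega
      rw [h0, List.foldl_nil, show 0 + L = L by ring, Nat.choose_self]
      norm_num
    · rw [show a + 1 = ((a.toNat : Nat) : Int) + 1 by omega, pvAlt_fold L a.toNat]
      have h1 := Nat.choose_symm (show L ≤ a.toNat + L by omega)
      rw [Nat.add_sub_cancel] at h1
      rw [Nat.add_comm L a.toNat, h1]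
  · simp only [if_neg hab]
    set n := a.toNat with hn
    rw [show a = (n : Int) by omega, pvAlt_fold n L]
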